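-- pv_equiv track=rewrite | github.com/pfchopz/Codilty | Lesson4.1.py | solution
-- ===== SOURCE A (Python) =====
-- def solution(X, A):
--     # write your code in Python 3.6
--     count = [-1] * (X + 1)
--     count[0] = 0
--     answer = 0
--
--     for i, value in enumerate(A):
--         if value > X:
--             pass
--         elif count[value] == -1:
--             count[value] = i
--
--     for pos in count:
--         if pos == -1:
--             return -1
--         elif pos > answer:
--             answer = pos
--
--     return answer
-- ===== SOURCE B (Python) =====
-- def solution(X, A):
--     if X == 0:
--         return 0
--     seen = set()
--     for i, value in enumerate(A):
--         if 1 <= value <= X and value not in seen: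
--             seen.add(value)
--             if len(seen) == X:
--                 return i
--     return -1
-- ===== Notes on version B (the rewrite author's own statement) =====
-- stated objective: simpler
-- what changed: Single pass keeping a set of distinct needed leaves with an early return as soon as all X are seen, instead of A's allocate-size-(X+1)-array, fill-first-occurrences, then second max/-1 scan.
-- outside the precondition, e.g. on solution(2, [-1, 1, 2]): A returns 1, B returns 2
import Mathlib
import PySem

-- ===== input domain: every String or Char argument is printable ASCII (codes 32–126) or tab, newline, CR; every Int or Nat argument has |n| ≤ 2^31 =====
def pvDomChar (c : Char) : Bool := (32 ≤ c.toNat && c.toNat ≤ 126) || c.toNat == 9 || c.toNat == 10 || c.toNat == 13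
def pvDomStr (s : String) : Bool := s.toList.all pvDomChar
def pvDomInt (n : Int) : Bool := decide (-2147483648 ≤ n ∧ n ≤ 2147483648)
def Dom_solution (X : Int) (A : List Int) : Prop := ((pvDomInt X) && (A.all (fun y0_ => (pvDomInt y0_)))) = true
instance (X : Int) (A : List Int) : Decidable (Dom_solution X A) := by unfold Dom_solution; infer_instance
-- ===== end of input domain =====

-- B replaces A's two-pass scheme (fill a size-(X+1) first-occurrence array, then a second
-- max/-1 scan over it) by one pass with a set of distinct needed leaves and an early return.

-- ===== PORT A =====
-- second loop of A: 'for pos in count: if pos == -1: return -1 elif pos > answer: answer = pos'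
def pvScanA : List Int → Int → Int
  | [], answer => answer
  | pos :: rest, answer =>
    if pos = -1 then -1
    else if pos > answer then pvScanA rest pos else pvScanA rest answer

-- first loop of A over enumerate(A); count[value] read/written with Python index semantics
def pvLoopA (X : Int) : List (Int × Int) → List Int → List Int
  | [], count => count
  | (i, v) :: rest, count =>
    if v > X then pvLoopA X rest count
    else match PySem.List.pyGet? count v with
      | none => pvLoopA X rest count   -- Python raises IndexError here; outside Pre_solution
      | some c =>
        if c = -1 then pvLoopA X rest (PySem.List.pySetD count v i)
        else pvLoopA X rest count

def solution (X : Int) (A : List Int) : Int :=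
  -- count = [-1] * (X + 1); count[0] = 0 (IndexError when X < 0: outside Pre_solution);
  -- first loop fills count, second loop (pvScanA) returns -1 or the max
  pvScanA
    (pvLoopA X (PySem.List.enumerate A 0)
      (PySem.List.pySetD (List.replicate (X + 1).toNat (-1 : Int)) 0 0)) 0

-- ===== PORT B =====
def pvLoopB (X : Int) : List (Int × Int) → PySem.Set Int → Int
  | [], _ => -1
  | (i, v) :: rest, seen =>
    if 1 ≤ v ∧ v ≤ X ∧ PySem.Set.contains seen v = false then
      let seen' := PySem.Set.add seen v
      if PySem.Set.len seen' = X then i else pvLoopB X rest seen'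
    else pvLoopB X rest seen

def solution_alt (X : Int) (A : List Int) : Int :=
  if X = 0 then 0
  else pvLoopB X (PySem.List.enumerate A 0) PySem.Set.empty

-- ===== PRECONDITION & SPEC =====
-- Pre_solution restricts to the task's natural domain (X ≥ 0, nonnegative leaf values): for
-- X < 0 or values below -(X+1) A raises IndexError, and other negative values are read through
-- Python's negative indexing into the count array, a corner outside the task's meaning on which
-- neither behaviour is specified.
def Pre_solution (X : Int) (A : List Int) : Prop := 0 ≤ X ∧ ∀ v ∈ A, 0 ≤ v
instance (X : Int) (A : List Int) : Decidable (Pre_solution X A) := by unfold Pre_solution; infer_instance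
def pvWitness_solution : Int × List Int := (2, [2, 1])

def Spec_solution (X : Int) (A : List Int) (out : Int) : Prop := out = solution_alt X A
instance (X : Int) (A : List Int) (out : Int) : Decidable (Spec_solution X A out) := by unfold Spec_solution; infer_instance

-- ===== CLAIM (what is proved, stated in full; the proofs are below) =====
def Claim_equal_solution : Prop := ∀ (X : Int) (A : List Int), Dom_solution X A → Pre_solution X A → Spec_solution X A (solution X A)

-- ===== LEMMAS AND PROOFS =====

-- upper bound for a foldl-max accumulator (specific pairing used by the full-slot case)
lemma pv_foldl_max_le (l : List Int) (a b : Int) (ha : a ≤ b) (h : ∀ x ∈ l, x ≤ b) :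
    l.foldl max a ≤ b := by
  induction l generalizing a with
  | nil => exact ha
  | cons x rest ih =>
    exact ih (max a x) (max_le ha (h x List.mem_cons_self))
      (fun y hy => h y (List.mem_cons_of_mem _ hy))

-- pigeonhole: fewer than X distinct values in [1, X] leave some value missing
lemma pv_missing (X : Int) (seen : List Int)
    (_hsub : ∀ v ∈ seen, 1 ≤ v ∧ v ≤ X) (hnodup : seen.Nodup)
    (hcard : (seen.length : Int) < X) :
    ∃ v : Int, 1 ≤ v ∧ v ≤ X ∧ v ∉ seen := by
  by_contra hc
  push Not at hc
  have hsubF : Finset.Icc (1 : Int) X ⊆ seen.toFinset := by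
    intro v hv
    rw [Finset.mem_Icc] at hv
    exact List.mem_toFinset.mpr (hc v hv.1 hv.2)
  have h1 := Finset.card_le_card hsubF
  rw [Int.card_Icc, List.toFinset_card_of_nodup hnodup] at h1
  omega

-- counting: X distinct values in [1, X] are all of them
lemma pv_all_mem (X : Int) (seen : List Int)
    (hsub : ∀ v ∈ seen, 1 ≤ v ∧ v ≤ X) (hnodup : seen.Nodup)
    (hcard : (seen.length : Int) = X) :
    ∀ v : Int, 1 ≤ v → v ≤ X → v ∈ seen := by
  intro v hv1 hvX
  have hsubF : seen.toFinset ⊆ Finset.Icc (1 : Int) X := by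
    intro u hu
    rw [Finset.mem_Icc]
    exact hsub u (List.mem_toFinset.mp hu)
  have heq : seen.toFinset = Finset.Icc (1 : Int) X := by
    apply Finset.eq_of_subset_of_card_le hsubF
    rw [Int.card_Icc, List.toFinset_card_of_nodup hnodup]
    omega
  have : v ∈ seen.toFinset := by
    rw [heq, Finset.mem_Icc]; exact ⟨hv1, hvX⟩
  exact List.mem_toFinset.mp this

-- pvScanA returns -1 iff a -1 entry occurs, else it is the running max
lemma pvScanA_of_neg_one_mem (l : List Int) (acc : Int) (h : (-1 : Int) ∈ l) :
    pvScanA l acc = -1 := by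
  induction l generalizing acc with
  | nil => cases h
  | cons p rest ih =>
    simp only [pvScanA]
    rcases List.mem_cons.mp h with h1 | h1
    · simp [h1.symm]
    · split_ifs <;> simp [ih _ h1]

lemma pvScanA_eq_foldl_max (l : List Int) (acc : Int) (h : (-1 : Int) ∉ l) :
    pvScanA l acc = l.foldl max acc := by
  induction l generalizing acc with
  | nil => rfl
  | cons p rest ih =>
    simp only [pvScanA, List.foldl_cons]
    have hp : p ≠ -1 := fun hc => h (hc ▸ List.mem_cons_self)
    have hrest : (-1 : Int) ∉ rest := fun hc => h (List.mem_cons_of_mem _ hc)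
    rw [if_neg hp]
    split_ifs with hgt
    · rw [ih _ hrest]; congr 1; omega
    · rw [ih _ hrest]; congr 1; omega

-- if every slot 0..X is already filled, A's first loop leaves count unchanged
lemma pvLoopA_noop (X : Int) (pairs : List (Int × Int)) (count : List Int)
    (hlen : count.length = (X + 1).toNat)
    (hvals : ∀ p ∈ pairs, 0 ≤ p.2)
    (hfull : ∀ k : Nat, k < count.length → count[k]? ≠ some (-1)) :
    pvLoopA X pairs count = count := by
  induction pairs with
  | nil => rfl
  | cons p rest ih =>
    obtain ⟨i, v⟩ := p
    have hv : 0 ≤ v := hvals (i, v) List.mem_cons_self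
    simp only [pvLoopA]
    split_ifs with hgt
    · exact ih (fun q hq => hvals q (List.mem_cons_of_mem _ hq))
    · have hvX : v ≤ X := by omega
      have hvlt : v.toNat < count.length := by omega
      rw [PySem.List.pyGet?_of_nonneg (i := v) (h := hv)]
      rw [List.getElem?_eq_getElem hvlt]
      have := hfull v.toNat hvlt
      rw [List.getElem?_eq_getElem hvlt] at this
      have hne : count[v.toNat] ≠ -1 := by intro hc; exact this (by rw [hc])
      simp only [if_neg hne]
      exact ih (fun q hq => hvals q (List.mem_cons_of_mem _ hq))

-- main simultaneous induction: A's fill-then-scan equals B's one pass, under the invariant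
lemma pvMain (X : Int) (pairs : List (Int × Int)) (count : List Int) (seen : PySem.Set Int)
    (hvals : ∀ p ∈ pairs, 0 ≤ p.2)
    (hidx : ∀ p ∈ pairs, 0 ≤ p.1)
    (hpw : pairs.Pairwise (fun p q => p.1 < q.1))
    (hlow : ∀ p ∈ pairs, ∀ j ∈ count, j ≤ p.1)
    (hlen : count.length = (X + 1).toNat)
    (h0 : count[0]? = some 0)
    (hseen : ∀ v : Int, 1 ≤ v → v ≤ X → (count[v.toNat]? ≠ some (-1) ↔ v ∈ seen))
    (hsub : ∀ v ∈ seen, 1 ≤ v ∧ v ≤ X)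
    (hnodup : seen.Nodup)
    (hcard : (seen.length : Int) < X) :
    pvScanA (pvLoopA X pairs count) 0 = pvLoopB X pairs seen := by
  induction pairs generalizing count seen with
  | nil =>
    simp only [pvLoopA, pvLoopB]
    obtain ⟨v, hv1, hvX, hvnot⟩ := pv_missing X seen hsub hnodup hcard
    have hget : count[v.toNat]? = some (-1) := by
      by_contra hc
      exact hvnot ((hseen v hv1 hvX).mp hc)
    exact pvScanA_of_neg_one_mem _ _ (List.mem_of_getElem? hget)
  | cons p rest ih =>
    obtain ⟨i, v⟩ := p
    have hX0 : 0 < X := lt_of_le_of_lt (Int.natCast_nonneg _) hcard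
    have hi : (0 : Int) ≤ i := hidx _ List.mem_cons_self
    have hv0 : (0 : Int) ≤ v := hvals _ List.mem_cons_self
    have hvals' : ∀ p ∈ rest, (0 : Int) ≤ p.2 := fun q hq => hvals q (List.mem_cons_of_mem _ hq)
    have hidx' : ∀ p ∈ rest, (0 : Int) ≤ p.1 := fun q hq => hidx q (List.mem_cons_of_mem _ hq)
    have hpw' := (List.pairwise_cons.mp hpw).2
    have hrel : ∀ q ∈ rest, i < q.1 := fun q hq => (List.pairwise_cons.mp hpw).1 q hq
    simp only [pvLoopA, pvLoopB]
    by_cases hcond : 1 ≤ v ∧ v ≤ X ∧ PySem.Set.contains seen v = false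
    · obtain ⟨hv1, hvX, hnotin⟩ := hcond
      have hvmem : v ∉ seen := by
        intro hm
        have h1 : List.contains seen v = true := List.contains_iff_mem.mpr hm
        simp [PySem.Set.contains] at hnotin
        exact hnotin hm
      have hvlt : v.toNat < count.length := by omega
      have hget : count[v.toNat]? = some (-1) := by
        by_contra hc
        exact hvmem ((hseen v hv1 hvX).mp hc)
      rw [if_neg (by omega : ¬ v > X),
        PySem.List.pyGet?_of_nonneg (i := v) (h := hv0), hget]
      simp only [reduceIte]
      rw [if_pos (show 1 ≤ v ∧ v ≤ X ∧ PySem.Set.contains seen v = false from ⟨hv1, hvX, hnotin⟩)]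
      have hadd : PySem.Set.add seen v = seen ++ [v] := by
        simp [PySem.Set.add, PySem.Set.contains, hvmem]
      have hset : PySem.List.pySetD count v i = count.set v.toNat i :=
        PySem.List.pySetD_of_nonneg count i hv0
      have hvtne0 : v.toNat ≠ 0 := by omega
      have hsub' : ∀ u ∈ seen ++ [v], 1 ≤ u ∧ u ≤ X := by
        intro u hu
        rcases List.mem_append.mp hu with h1 | h1
        · exact hsub u h1
        · simp at h1; subst h1; exact ⟨hv1, hvX⟩
      have hnodup' : (seen ++ [v]).Nodup :=
        List.Nodup.append hnodup (List.nodup_singleton v) (List.disjoint_singleton.mpr hvmem)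
      have hseen' : ∀ u : Int, 1 ≤ u → u ≤ X →
          ((count.set v.toNat i)[u.toNat]? ≠ some (-1) ↔ u ∈ seen ++ [v]) := by
        intro u hu1 huX
        by_cases huv : u = v
        · subst huv
          rw [List.getElem?_set_self hvlt]
          constructor
          · intro _; exact List.mem_append.mpr (Or.inr (by simp))
          · intro _ hc
            have : i = -1 := by injection hc
            omega
        · have hne : v.toNat ≠ u.toNat := by omega
          rw [List.getElem?_set_ne hne, hseen u hu1 huX]
          constructor
          · intro h1; exact List.mem_append.mpr (Or.inl h1)
          · intro h1
            rcases List.mem_append.mp h1 with h2 | h2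
            · exact h2
            · simp at h2; exact absurd h2 huv
      rw [hadd, hset]
      by_cases hfull : PySem.Set.len (seen ++ [v]) = X
      · rw [if_pos hfull]
        have hlenfull : ((seen ++ [v]).length : Int) = X := by
          simpa [PySem.Set.len] using hfull
        have hallmem := pv_all_mem X (seen ++ [v]) hsub' hnodup' hlenfull
        have hfilled : ∀ k : Nat, k < (count.set v.toNat i).length →
            (count.set v.toNat i)[k]? ≠ some (-1) := by
          intro k hk
          rw [List.length_set] at hk
          by_cases hk0 : k = 0
          · subst hk0
            rw [List.getElem?_set_ne hvtne0, h0]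
            intro hc; injection hc with hc; omega
          · by_cases hkv : k = v.toNat
            · subst hkv
              rw [List.getElem?_set_self hvlt]
              intro hc; injection hc with hc; omega
            · have hk1 : 1 ≤ ((k : Int)) := by omega
              have hkX : ((k : Int)) ≤ X := by omega
              have := hallmem (k : Int) hk1 hkX
              rcases List.mem_append.mp this with h2 | h2
              · have h3 := (hseen (k : Int) hk1 hkX).mpr h2
                rw [Int.toNat_natCast] at h3
                rw [List.getElem?_set_ne (by omega : v.toNat ≠ k)]
                exact h3
              · simp at h2; omega
        rw [pvLoopA_noop X rest (count.set v.toNat i) (by rw [List.length_set]; exact hlen) hvals' hfilled]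
        have hnomem : (-1 : Int) ∉ count.set v.toNat i := by
          intro hm
          obtain ⟨k, hk, hke⟩ := List.mem_iff_getElem.mp hm
          exact hfilled k hk (by rw [List.getElem?_eq_getElem hk, hke])
        rw [pvScanA_eq_foldl_max _ _ hnomem]
        have hle : (count.set v.toNat i).foldl max 0 ≤ i := by
          apply pv_foldl_max_le _ _ _ hi
          intro x hx
          rcases List.mem_or_eq_of_mem_set hx with h2 | h2
          · exact hlow (i, v) List.mem_cons_self x h2
          · omega
        have hmemi : i ∈ count.set v.toNat i :=
          List.mem_of_getElem? (List.getElem?_set_self hvlt)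
        have hge := (PySem.List.le_foldl_max (count.set v.toNat i) 0).2 i hmemi
        omega
      · rw [if_neg hfull]
        apply ih (count.set v.toNat i) (seen ++ [v]) hvals' hidx' hpw'
        · intro q hq j hj
          rcases List.mem_or_eq_of_mem_set hj with h2 | h2
          · exact hlow q (List.mem_cons_of_mem _ hq) j h2
          · have := hrel q hq; omega
        · rw [List.length_set]; exact hlen
        · rw [List.getElem?_set_ne hvtne0]; exact h0
        · exact hseen'
        · exact hsub'
        · exact hnodup'
        · have hlenle : ((seen ++ [v]).length : Int) ≤ X := by
            have hF : (seen ++ [v]).toFinset ⊆ Finset.Icc (1 : Int) X := fun u hu =>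
              Finset.mem_Icc.mpr (hsub' u (List.mem_toFinset.mp hu))
            have hc := Finset.card_le_card hF
            rw [Int.card_Icc, List.toFinset_card_of_nodup hnodup'] at hc
            omega
          have hlenne : ((seen ++ [v]).length : Int) ≠ X := fun hc => hfull hc
          simp only [List.length_append, List.length_cons, List.length_nil] at hlenle hlenne ⊢
          omega
    · rw [if_neg hcond]
      by_cases hgt : v > X
      · rw [if_pos hgt]
        exact ih count seen hvals' hidx' hpw'
          (fun q hq j hj => hlow q (List.mem_cons_of_mem _ hq) j hj)
          hlen h0 hseen hsub hnodup hcard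
      · have hvlt : v.toNat < count.length := by omega
        have hget : count[v.toNat]? ≠ some (-1) := by
          by_cases hv1 : 1 ≤ v
          · have hvmem : v ∈ seen := by
              by_contra hm
              apply hcond
              refine ⟨hv1, by omega, ?_⟩
              simpa [PySem.Set.contains] using hm
            exact (hseen v hv1 (by omega)).mpr hvmem
          · have : v = 0 := by omega
            subst this
            rw [show ((0 : Int)).toNat = 0 from rfl, h0]
            intro hc; injection hc with hc; omega
        rw [if_neg hgt, PySem.List.pyGet?_of_nonneg (i := v) (h := hv0),
          List.getElem?_eq_getElem hvlt]
        have hne : count[v.toNat] ≠ -1 := by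
          intro hc
          exact hget (by rw [List.getElem?_eq_getElem hvlt, hc])
        simp only [if_neg hne]
        exact ih count seen hvals' hidx' hpw'
          (fun q hq j hj => hlow q (List.mem_cons_of_mem _ hq) j hj)
          hlen h0 hseen hsub hnodup hcard


theorem pv_equal (X : Int) (A : List Int) (h : Pre_solution X A) :
    solution X A = solution_alt X A := by
  obtain ⟨hX, hvals⟩ := h
  have hvalsE : ∀ p ∈ PySem.List.enumerate A 0, (0 : Int) ≤ p.2 := by
    intro p hp
    rw [PySem.List.mem_enumerate_iff] at hp
    obtain ⟨k, hk, rfl⟩ := hp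
    exact hvals _ (List.getElem_mem hk)
  unfold solution solution_alt
  have hset0 : PySem.List.pySetD (List.replicate (X + 1).toNat (-1 : Int)) 0 0 =
      (List.replicate (X + 1).toNat (-1 : Int)).set 0 0 :=
    PySem.List.pySetD_of_nonneg _ _ (le_refl 0)
  by_cases hX0 : X = 0
  · subst hX0
    rw [if_pos rfl]
    have hrep : (List.replicate ((0 : Int) + 1).toNat (-1 : Int)) = [-1] := rfl
    rw [hset0, hrep]
    have hnoop := pvLoopA_noop 0 (PySem.List.enumerate A 0) (([-1] : List Int).set 0 0)
      (by rfl) hvalsE (by decide)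
    rw [hnoop]
    rfl
  · rw [if_neg hX0]
    rw [hset0]
    have hlen : ((List.replicate (X + 1).toNat (-1 : Int)).set 0 0).length = (X + 1).toNat := by
      simp
    have hpos : 0 < ((List.replicate (X + 1).toNat (-1 : Int)).set 0 0).length := by
      rw [hlen]; omega
    apply pvMain X (PySem.List.enumerate A 0) _ PySem.Set.empty hvalsE
    · intro p hp
      rw [PySem.List.mem_enumerate_iff] at hp
      obtain ⟨k, hk, rfl⟩ := hp
      simp
    · exact PySem.List.pairwise_lt_enumerate A 0
    · intro p hp j hj
      have hp1 : (0 : Int) ≤ p.1 := by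
        rw [PySem.List.mem_enumerate_iff] at hp
        obtain ⟨k, hk, rfl⟩ := hp
        simp
      rcases List.mem_or_eq_of_mem_set hj with h2 | h2
      · have := List.eq_of_mem_replicate h2; omega
      · omega
    · exact hlen
    · rw [List.getElem?_set_self (by simpa using hpos)]
    · intro v hv1 hvX
      have hvt : v.toNat < (X + 1).toNat := by omega
      have hne : (0 : Nat) ≠ v.toNat := by omega
      rw [List.getElem?_set_ne hne, List.getElem?_replicate_of_lt (by simpa using hvt)]
      constructor
      · intro hc; exact absurd rfl hc
      · intro hc; exact absurd hc (List.not_mem_nil)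
    · intro v hv; exact absurd hv (List.not_mem_nil)
    · exact List.nodup_nil
    · simpa using (by omega : 0 < X)

-- ===== VERDICT (by name: the statement is the Claim_ definition above) =====
theorem solution_spec : Claim_equal_solution := by
  intro X A _ hPre
  unfold Spec_solution
  exact pv_equal X A hPre
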